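-- pv_equiv track=rewrite | github.com/topikuning/marlinv2 | backend/app/services/vo_excel_service.py | _check_zero_price_bypass
-- ===== SOURCE A (Python) =====
-- ZERO_PRICE_BYPASS_KEYWORDS = ("PARENT", "INFO", "OWNER", "TITIPAN")
--
-- def _check_zero_price_bypass(notes: str) -> bool:
--     """True jika `notes` diawali salah satu keyword whitelist (case-insensitive)."""
--     if not notes:
--         return False
--     text = notes.strip().upper()
--     for kw in ZERO_PRICE_BYPASS_KEYWORDS:
--         if text == kw or text.startswith(f"{kw}:") or text.startswith(f"{kw} "):
--             return True
--     return False
-- ===== SOURCE B (Python) =====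
-- ZERO_PRICE_BYPASS_KEYWORDS = ("PARENT", "INFO", "OWNER", "TITIPAN")
-- _KEYWORD_SET = frozenset(ZERO_PRICE_BYPASS_KEYWORDS)
--
-- def _check_zero_price_bypass(notes: str) -> bool:
--     """True jika `notes` diawali salah satu keyword whitelist (case-insensitive)."""
--     if not notes:
--         return False
--     text = notes.strip().upper()
--     i = 0
--     while i < len(text) and text[i] != ' ' and text[i] != ':':
--         i += 1
--     return text[:i] in _KEYWORD_SET
-- ===== Notes on version B (the rewrite author's own statement) =====
-- stated objective: simpler
-- what changed: B extracts the leading token of the stripped uppercased string once (scan to the first space/colon, slice) and tests set membership, instead of A's loop of three prefix/equality tests per keyword.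
import Mathlib
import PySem

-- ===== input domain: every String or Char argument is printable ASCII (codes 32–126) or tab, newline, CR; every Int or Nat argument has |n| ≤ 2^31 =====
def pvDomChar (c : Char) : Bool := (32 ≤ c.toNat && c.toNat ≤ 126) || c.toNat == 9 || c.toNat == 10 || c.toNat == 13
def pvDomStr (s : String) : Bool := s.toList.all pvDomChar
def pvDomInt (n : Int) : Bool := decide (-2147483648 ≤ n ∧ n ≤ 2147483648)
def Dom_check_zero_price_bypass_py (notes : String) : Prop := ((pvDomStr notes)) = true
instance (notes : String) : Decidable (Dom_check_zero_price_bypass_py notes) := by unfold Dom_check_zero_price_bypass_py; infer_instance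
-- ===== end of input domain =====

-- B replaces A's per-keyword prefix tests by one leading-token extraction plus set membership (simpler).

-- ===== PORT A =====
def pvKeywords : List String := ["PARENT", "INFO", "OWNER", "TITIPAN"]

def check_zero_price_bypass_py (notes : String) : Bool :=
  if notes = "" then false
  else
    let text := PySem.Str.upper (PySem.Str.strip notes)
    pvKeywords.any (fun kw =>
      text == kw || PySem.Str.startswith text (kw ++ ":") || PySem.Str.startswith text (kw ++ " "))

-- ===== PORT B =====
def pvDelim (c : Char) : Bool := c == ' ' || c == ':'

def pvKeywordSet : List (List Char) := ["PARENT".toList, "INFO".toList, "OWNER".toList, "TITIPAN".toList]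

def check_zero_price_bypass_py_alt (notes : String) : Bool :=
  if notes = "" then false
  else
    let text := (PySem.Str.upper (PySem.Str.strip notes)).toList
    -- while-loop scan to the first ' ' or ':' and slice text[:i]  =  takeWhile
    pvKeywordSet.contains (text.takeWhile (fun c => !pvDelim c))

-- ===== PRECONDITION & SPEC =====
def Spec_check_zero_price_bypass_py (notes : String) (out : Bool) : Prop := out = check_zero_price_bypass_py_alt notes
instance (notes : String) (out : Bool) : Decidable (Spec_check_zero_price_bypass_py notes out) := by unfold Spec_check_zero_price_bypass_py; infer_instance

-- ===== CLAIM (what is proved, stated in full; the proofs are below) =====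
def Claim_equal_check_zero_price_bypass_py : Prop := ∀ (notes : String), Dom_check_zero_price_bypass_py notes → Spec_check_zero_price_bypass_py notes (check_zero_price_bypass_py notes)

-- ===== LEMMAS AND PROOFS =====

/-- For a keyword without delimiter characters, A's test (equal, or prefix followed by ':' or ' ')
    is exactly "the leading token equals the keyword". -/
lemma head_eq_iff (kw : List Char) (h : ∀ c ∈ kw, pvDelim c = false) :
    ∀ t : List Char,
      (t = kw ∨ (kw ++ [':']) <+: t ∨ (kw ++ [' ']) <+: t) ↔
        t.takeWhile (fun c => !pvDelim c) = kw := by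
  induction kw with
  | nil =>
    intro t
    cases t with
    | nil => simp
    | cons c t' =>
      simp only [List.nil_append, List.takeWhile_cons]
      by_cases h1 : c = ' '
      · subst h1; simp [pvDelim, List.cons_prefix_cons]
      · by_cases h2 : c = ':'
        · subst h2; simp [pvDelim, List.cons_prefix_cons]
        · simp [pvDelim, h1, h2, List.cons_prefix_cons, Ne.symm h1, Ne.symm h2]
  | cons k kw' ih =>
    have hk : pvDelim k = false := h k (List.mem_cons_self ..)
    have h' : ∀ c ∈ kw', pvDelim c = false := fun c hc => h c (List.mem_cons_of_mem _ hc)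
    intro t
    cases t with
    | nil =>
      simp only [List.takeWhile_nil]
      constructor
      · rintro (h0 | hp | hp)
        · exact absurd h0.symm (List.cons_ne_nil k kw')
        · rcases hp with ⟨u, hu⟩; simp at hu
        · rcases hp with ⟨u, hu⟩; simp at hu
      · intro h0; exact absurd h0.symm (List.cons_ne_nil k kw')
    | cons c t' =>
      simp only [List.takeWhile_cons, List.cons_append, List.cons_prefix_cons]
      by_cases hc : pvDelim c
      · simp only [hc, Bool.not_true]
        constructor
        · rintro (h0 | ⟨rfl, _⟩ | ⟨rfl, _⟩)
          · injection h0 with h1 _; subst h1; rw [hk] at hc; exact absurd hc Bool.false_ne_true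
          · rw [hk] at hc; exact absurd hc Bool.false_ne_true
          · rw [hk] at hc; exact absurd hc Bool.false_ne_true
        · intro h0; exact absurd h0.symm (List.cons_ne_nil k kw')
      · simp only [Bool.not_eq_true] at hc
        simp only [hc, Bool.not_false]
        constructor
        · rintro (h0 | ⟨rfl, hp⟩ | ⟨rfl, hp⟩)
          · injection h0 with h1 h2; subst h1
            rw [(ih h' t').symm.mpr (Or.inl h2)]; simp
          · rw [(ih h' t').symm.mpr (Or.inr (Or.inl hp))]; simp
          · rw [(ih h' t').symm.mpr (Or.inr (Or.inr hp))]; simp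
        · intro h0
          injection h0 with h1 h2
          subst h1
          rcases (ih h' t').mpr h2 with h3 | h3 | h3
          · exact Or.inl (by rw [h3])
          · exact Or.inr (Or.inl ⟨rfl, h3⟩)
          · exact Or.inr (Or.inr ⟨rfl, h3⟩)

lemma one_kw (t : List Char) (kw : String) (h : ∀ c ∈ kw.toList, pvDelim c = false) :
    (String.ofList t == kw || PySem.Str.startswith (String.ofList t) (kw ++ ":")
      || PySem.Str.startswith (String.ofList t) (kw ++ " "))
    = (t.takeWhile (fun c => !pvDelim c) == kw.toList) := by
  rw [Bool.eq_iff_iff]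
  simp only [Bool.or_eq_true, beq_iff_eq, PySem.Str.startswith_eq]
  rw [PySem.Chars.startswith_iff, PySem.Chars.startswith_iff]
  have hstr : String.ofList t = kw ↔ t = kw.toList := by
    constructor
    · intro h0; rw [← h0]; simp
    · intro h0; rw [h0]; simp
  rw [hstr]
  have h1 : (kw ++ ":").toList = kw.toList ++ [':'] := by simp
  have h2 : (kw ++ " ").toList = kw.toList ++ [' '] := by simp
  have hmk : (String.ofList t).toList = t := by simp
  rw [h1, h2, hmk, or_assoc]
  exact head_eq_iff kw.toList h t

-- ===== VERDICT (by name: the statement is the Claim_ definition above) =====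
theorem check_zero_price_bypass_py_spec : Claim_equal_check_zero_price_bypass_py := by
  intro notes _
  unfold Spec_check_zero_price_bypass_py check_zero_price_bypass_py check_zero_price_bypass_py_alt
  by_cases h : notes = ""
  · simp [h]
  · simp only [if_neg h]
    generalize PySem.Str.upper (PySem.Str.strip notes) = s
    rw [show s = String.ofList s.toList from String.ofList_toList.symm]
    simp only [String.toList_ofList]
    set t := s.toList with ht
    have e1 := one_kw t "PARENT" (by
      rw [show "PARENT".toList = ['P','A','R','E','N','T'] from rfl]
      intro c hc; fin_cases hc <;> rfl)
    have e2 := one_kw t "INFO" (by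
      rw [show "INFO".toList = ['I','N','F','O'] from rfl]
      intro c hc; fin_cases hc <;> rfl)
    have e3 := one_kw t "OWNER" (by
      rw [show "OWNER".toList = ['O','W','N','E','R'] from rfl]
      intro c hc; fin_cases hc <;> rfl)
    have e4 := one_kw t "TITIPAN" (by
      rw [show "TITIPAN".toList = ['T','I','T','I','P','A','N'] from rfl]
      intro c hc; fin_cases hc <;> rfl)
    simp only [pvKeywords, List.any_cons, List.any_nil, pvKeywordSet, List.contains_cons,
      List.contains_nil, e1, e2, e3, e4, Bool.or_false]
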